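-- pv_equiv track=rewrite | github.com/Kplpdsn/Sales-analysis-dashboard-sync-gdrive | sales_dashboard.py | get_bakery_category
-- ===== SOURCE A (Python) =====
-- def get_bakery_category(item):
--     """Categorize bakery items"""
--     item = str(item).upper().strip()
--     if not item or item in ["NAN", "BLANK"]: return "Ignore"
--
--     # Bake at Home - check for BAH items first (must be before ESCARGOT check)
--     if "BAKE AT HOME" in item or "BAH" in item or "S/ROLL" in item or "CHEESY VEG" in item or "SHARE PIE" in item:
--         return "Bake at Home"
--
--     # Weekend Special
--     if "STOLLEN" in item or "SALT & PEPPER BAGUETTE" in item or "SALT AND PEPPER BAGUETTE" in item: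
--         return "Weekend Special"
--
--     # XL Loaves vs Standard Loaves
--     if any(x in item for x in ["SOURDOUGH", "BATARD", "BAGUETTE", "S/DOUGH"]):
--         return "XL Loaves" if "XL" in item else "Standard Loaves"
--
--     # Pastries - including plain ESCARGOT (not BAH ESCARGOT which was caught above)
--     if any(x in item for x in ["DANISH", "CROISSANT", "SCROLL", "PASTRY", "ESCARGOT"]):
--         return "Pastries"
--
--     # FMT
--     if any(x in item for x in ["FMT", "GINGER SNAP", "TART"]):
--         return "FMT"
--
--     # Retail Items
--     if any(x in item for x in ["COOKIE", "GRANOLA", "COFFEE", "REDBRICK", "HONEY", "BEYOND BREAD", "BAKERS OVEN"]) or "B&B" in item: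
--         return "Retail Items"
--
--     # Buns & Rolls
--     if any(x in item for x in ["BUN", "ROLL"]):
--         return "Buns & Rolls"
--
--     return "Other"
-- ===== SOURCE B (Python) =====
-- # One flat pass: compute the MINIMUM priority rank of any matching keyword
-- # (aggregation / min-reduction) instead of an ordered cascade of group tests.
-- _GROUPS = [
--     ("BAKE AT HOME", "BAH", "S/ROLL", "CHEESY VEG", "SHARE PIE"),      # 0 Bake at Home
--     ("STOLLEN", "SALT & PEPPER BAGUETTE", "SALT AND PEPPER BAGUETTE"),  # 1 Weekend Special
--     ("SOURDOUGH", "BATARD", "BAGUETTE", "S/DOUGH"),                     # 2 loaves (XL/Standard)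
--     ("DANISH", "CROISSANT", "SCROLL", "PASTRY", "ESCARGOT"),            # 3 Pastries
--     ("FMT", "GINGER SNAP", "TART"),                                     # 4 FMT
--     ("COOKIE", "GRANOLA", "COFFEE", "REDBRICK", "HONEY", "BEYOND BREAD",
--      "BAKERS OVEN", "B&B"),                                             # 5 Retail Items
--     ("BUN", "ROLL"),                                                    # 6 Buns & Rolls
-- ]
-- KEYWORD_RANKS = [(kw, r) for r, kws in enumerate(_GROUPS) for kw in kws]
-- CATEGORIES = ["Bake at Home", "Weekend Special", None, "Pastries", "FMT",
--               "Retail Items", "Buns & Rolls"]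
--
-- def get_bakery_category(item):
--     """Categorize bakery items (min-rank over flat keyword list)."""
--     item = str(item).upper().strip()
--     if not item or item in ("NAN", "BLANK"):
--         return "Ignore"
--     best = min((r for kw, r in KEYWORD_RANKS if kw in item), default=len(_GROUPS))
--     if best == len(_GROUPS):
--         return "Other"
--     if best == 2:
--         return "XL Loaves" if "XL" in item else "Standard Loaves"
--     return CATEGORIES[best]
-- ===== Notes on version B (the rewrite author's own statement) =====
-- stated objective: alternative
-- what changed: Replaces the short-circuiting if-ladder of per-group substring tests by a single aggregation pass: every keyword carries a priority rank in one flat list, the answer is the minimum rank among all matching keywords (default = no match), then one table lookup; correctness is that the minimum matched rank equals the first group the cascade would hit.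
import Mathlib
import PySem

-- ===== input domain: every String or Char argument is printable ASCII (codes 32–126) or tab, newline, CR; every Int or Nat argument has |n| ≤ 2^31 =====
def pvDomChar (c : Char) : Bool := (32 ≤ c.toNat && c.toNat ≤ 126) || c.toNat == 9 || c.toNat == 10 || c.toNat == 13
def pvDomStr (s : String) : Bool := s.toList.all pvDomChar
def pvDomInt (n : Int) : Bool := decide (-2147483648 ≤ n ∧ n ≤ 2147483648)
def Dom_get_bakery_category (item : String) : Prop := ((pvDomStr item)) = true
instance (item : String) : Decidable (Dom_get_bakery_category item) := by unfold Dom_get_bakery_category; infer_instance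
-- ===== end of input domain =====

-- B replaces A's short-circuiting if-ladder by a min-rank aggregation over a flat keyword list (alternative; same cost).

-- ===== PORT A =====
def get_bakery_category (item : String) : String :=
  let item := PySem.Str.strip (PySem.Str.upper item)
  if item == "" || item == "NAN" || item == "BLANK" then "Ignore"
  else if PySem.Str.isIn "BAKE AT HOME" item || PySem.Str.isIn "BAH" item ||
          PySem.Str.isIn "S/ROLL" item || PySem.Str.isIn "CHEESY VEG" item ||
          PySem.Str.isIn "SHARE PIE" item then "Bake at Home"
  else if PySem.Str.isIn "STOLLEN" item || PySem.Str.isIn "SALT & PEPPER BAGUETTE" item ||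
          PySem.Str.isIn "SALT AND PEPPER BAGUETTE" item then "Weekend Special"
  else if ["SOURDOUGH", "BATARD", "BAGUETTE", "S/DOUGH"].any (fun x => PySem.Str.isIn x item) then
    (if PySem.Str.isIn "XL" item then "XL Loaves" else "Standard Loaves")
  else if ["DANISH", "CROISSANT", "SCROLL", "PASTRY", "ESCARGOT"].any (fun x => PySem.Str.isIn x item) then "Pastries"
  else if ["FMT", "GINGER SNAP", "TART"].any (fun x => PySem.Str.isIn x item) then "FMT"
  else if ["COOKIE", "GRANOLA", "COFFEE", "REDBRICK", "HONEY", "BEYOND BREAD", "BAKERS OVEN"].any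
            (fun x => PySem.Str.isIn x item) || PySem.Str.isIn "B&B" item then "Retail Items"
  else if ["BUN", "ROLL"].any (fun x => PySem.Str.isIn x item) then "Buns & Rolls"
  else "Other"

-- ===== PORT B =====
-- flat (keyword, priority-rank) list: KEYWORD_RANKS of Source B
def pvKeywordRanks : List (String × Nat) :=
  [("BAKE AT HOME", 0), ("BAH", 0), ("S/ROLL", 0), ("CHEESY VEG", 0), ("SHARE PIE", 0),
   ("STOLLEN", 1), ("SALT & PEPPER BAGUETTE", 1), ("SALT AND PEPPER BAGUETTE", 1),
   ("SOURDOUGH", 2), ("BATARD", 2), ("BAGUETTE", 2), ("S/DOUGH", 2),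
   ("DANISH", 3), ("CROISSANT", 3), ("SCROLL", 3), ("PASTRY", 3), ("ESCARGOT", 3),
   ("FMT", 4), ("GINGER SNAP", 4), ("TART", 4),
   ("COOKIE", 5), ("GRANOLA", 5), ("COFFEE", 5), ("REDBRICK", 5), ("HONEY", 5),
   ("BEYOND BREAD", 5), ("BAKERS OVEN", 5), ("B&B", 5),
   ("BUN", 6), ("ROLL", 6)]

-- CATEGORIES of Source B (index 2, Python's None, is never read: rank 2 is handled inline)
def pvCategories : List String :=
  ["Bake at Home", "Weekend Special", "", "Pastries", "FMT", "Retail Items", "Buns & Rolls"]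

def get_bakery_category_alt (item : String) : String :=
  let item := PySem.Str.strip (PySem.Str.upper item)
  if item == "" || item == "NAN" || item == "BLANK" then "Ignore"
  else
    -- min over the generator of ranks of matching keywords, default 7 (= len(_GROUPS))
    let best := pvKeywordRanks.foldl
      (fun a p => if PySem.Str.isIn p.1 item then min a p.2 else a) 7
    if best == 7 then "Other"
    else if best == 2 then
      (if PySem.Str.isIn "XL" item then "XL Loaves" else "Standard Loaves")
    else pvCategories.getD best ""

-- ===== PRECONDITION & SPEC =====
def Spec_get_bakery_category (item : String) (out : String) : Prop := out = get_bakery_category_alt item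
instance (item : String) (out : String) : Decidable (Spec_get_bakery_category item out) := by unfold Spec_get_bakery_category; infer_instance

-- ===== CLAIM (what is proved, stated in full; the proofs are below) =====
def Claim_equal_get_bakery_category : Prop := ∀ (item : String), Dom_get_bakery_category item → Spec_get_bakery_category item (get_bakery_category item)

-- ===== LEMMAS AND PROOFS =====

-- the fold never exceeds its accumulator
theorem pvFold_le_init (t : String) :
    ∀ (l : List (String × Nat)) (a : Nat),
      l.foldl (fun a p => if PySem.Str.isIn p.1 t then min a p.2 else a) a ≤ a := by
  intro l
  induction l with
  | nil => intro a; exact le_refl a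
  | cons hd tl ih =>
      intro a
      simp only [List.foldl_cons]
      by_cases h : PySem.Str.isIn hd.1 t
      · simp only [h, if_pos]
        exact le_trans (ih _) (min_le_left _ _)
      · simp only [h, if_neg, Bool.false_eq_true, not_false_iff]
        exact ih a

-- a matching keyword bounds the fold from above by its rank
theorem pvFold_le_of_mem (t : String) (kw : String) (r : Nat) :
    ∀ (l : List (String × Nat)), (kw, r) ∈ l → PySem.Str.isIn kw t = true → ∀ (a : Nat),
      l.foldl (fun a q => if PySem.Str.isIn q.1 t then min a q.2 else a) a ≤ r := by
  intro l
  induction l with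
  | nil => intro h; exact absurd h (List.not_mem_nil)
  | cons hd tl ih =>
      intro hmem hc a
      rcases List.mem_cons.mp hmem with heq | hmem'
      · subst heq
        simp only [List.foldl_cons, hc, if_pos]
        exact le_trans (pvFold_le_init t tl _) (min_le_right _ _)
      · simp only [List.foldl_cons]
        by_cases h : PySem.Str.isIn hd.1 t <;>
          simp only [h, if_pos, if_neg, Bool.false_eq_true, not_false_iff] <;>
          exact ih hmem' hc _

-- if every matching rank is ≥ k and the accumulator is ≥ k, so is the fold
theorem pvFold_lb (t : String) (k : Nat) :
    ∀ (l : List (String × Nat)) (a : Nat),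
      (∀ p ∈ l, PySem.Str.isIn p.1 t = true → k ≤ p.2) → k ≤ a →
      k ≤ l.foldl (fun a q => if PySem.Str.isIn q.1 t then min a q.2 else a) a := by
  intro l
  induction l with
  | nil => intro a _ ha; exact ha
  | cons hd tl ih =>
      intro a hall ha
      simp only [List.foldl_cons]
      by_cases h : PySem.Str.isIn hd.1 t
      · simp only [h, if_pos]
        exact ih _ (fun p hp => hall p (List.mem_cons_of_mem _ hp))
          (le_min ha (hall hd (List.mem_cons_self) h))
      · simp only [h, if_neg, Bool.false_eq_true, not_false_iff]
        exact ih _ (fun p hp => hall p (List.mem_cons_of_mem _ hp)) ha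

-- ===== VERDICT (by name: the statement is the Claim_ definition above) =====
theorem get_bakery_category_spec : Claim_equal_get_bakery_category := by
  intro item _
  unfold Spec_get_bakery_category get_bakery_category get_bakery_category_alt
  generalize PySem.Str.strip (PySem.Str.upper item) = t
  by_cases hg : (t == "" || t == "NAN" || t == "BLANK") = true
  · simp only [hg, if_true]
  · simp only [if_neg hg]
    by_cases h0 : (PySem.Str.isIn "BAKE AT HOME" t || PySem.Str.isIn "BAH" t ||
        PySem.Str.isIn "S/ROLL" t || PySem.Str.isIn "CHEESY VEG" t ||
        PySem.Str.isIn "SHARE PIE" t) = true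
    case pos =>
      simp only [if_pos h0]
      simp only [List.any_cons, List.any_nil, Bool.or_false, Bool.or_eq_true, or_assoc] at h0
      have hb : (pvKeywordRanks.foldl (fun a p => if PySem.Str.isIn p.1 t then min a p.2 else a) 7) = 0 := by
        refine le_antisymm ?_ ?_
        · rcases h0 with h|h|h|h|h <;>
            exact pvFold_le_of_mem t _ _ pvKeywordRanks (by simp [pvKeywordRanks]) h 7
        · exact Nat.zero_le _
      rw [hb]
      simp [pvCategories]
    case neg =>
      simp only [if_neg h0]
      by_cases h1 : (PySem.Str.isIn "STOLLEN" t || PySem.Str.isIn "SALT & PEPPER BAGUETTE" t ||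
        PySem.Str.isIn "SALT AND PEPPER BAGUETTE" t) = true
      case pos =>
        simp only [if_pos h1]
        simp only [List.any_cons, List.any_nil, Bool.or_false, Bool.or_eq_true, or_assoc] at h1
        simp only [List.any_cons, List.any_nil, Bool.or_false, Bool.or_eq_true, not_or, Bool.not_eq_true] at h0
        have hb : (pvKeywordRanks.foldl (fun a p => if PySem.Str.isIn p.1 t then min a p.2 else a) 7) = 1 := by
          refine le_antisymm ?_ ?_
          · rcases h1 with h|h|h <;>
              exact pvFold_le_of_mem t _ _ pvKeywordRanks (by simp [pvKeywordRanks]) h 7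
          · refine pvFold_lb t 1 pvKeywordRanks 7 ?_ (by norm_num)
            intro p hp hc
            simp only [pvKeywordRanks] at hp
            fin_cases hp <;> simp_all
        rw [hb]
        simp [pvCategories]
      case neg =>
        simp only [if_neg h1]
        by_cases h2 : (["SOURDOUGH", "BATARD", "BAGUETTE", "S/DOUGH"].any (fun x => PySem.Str.isIn x t)) = true
        case pos =>
          simp only [if_pos h2]
          simp only [List.any_cons, List.any_nil, Bool.or_false, Bool.or_eq_true, or_assoc] at h2
          simp only [List.any_cons, List.any_nil, Bool.or_false, Bool.or_eq_true, not_or, Bool.not_eq_true] at h0 h1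
          have hb : (pvKeywordRanks.foldl (fun a p => if PySem.Str.isIn p.1 t then min a p.2 else a) 7) = 2 := by
            refine le_antisymm ?_ ?_
            · rcases h2 with h|h|h|h <;>
                exact pvFold_le_of_mem t _ _ pvKeywordRanks (by simp [pvKeywordRanks]) h 7
            · refine pvFold_lb t 2 pvKeywordRanks 7 ?_ (by norm_num)
              intro p hp hc
              simp only [pvKeywordRanks] at hp
              fin_cases hp <;> simp_all
          rw [hb]
          simp [pvCategories]
        case neg =>
          simp only [if_neg h2]
          by_cases h3 : (["DANISH", "CROISSANT", "SCROLL", "PASTRY", "ESCARGOT"].any (fun x => PySem.Str.isIn x t)) = true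
          case pos =>
            simp only [if_pos h3]
            simp only [List.any_cons, List.any_nil, Bool.or_false, Bool.or_eq_true, or_assoc] at h3
            simp only [List.any_cons, List.any_nil, Bool.or_false, Bool.or_eq_true, not_or, Bool.not_eq_true] at h0 h1 h2
            have hb : (pvKeywordRanks.foldl (fun a p => if PySem.Str.isIn p.1 t then min a p.2 else a) 7) = 3 := by
              refine le_antisymm ?_ ?_
              · rcases h3 with h|h|h|h|h <;>
                  exact pvFold_le_of_mem t _ _ pvKeywordRanks (by simp [pvKeywordRanks]) h 7
              · refine pvFold_lb t 3 pvKeywordRanks 7 ?_ (by norm_num)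
                intro p hp hc
                simp only [pvKeywordRanks] at hp
                fin_cases hp <;> simp_all
            rw [hb]
            simp [pvCategories]
          case neg =>
            simp only [if_neg h3]
            by_cases h4 : (["FMT", "GINGER SNAP", "TART"].any (fun x => PySem.Str.isIn x t)) = true
            case pos =>
              simp only [if_pos h4]
              simp only [List.any_cons, List.any_nil, Bool.or_false, Bool.or_eq_true, or_assoc] at h4
              simp only [List.any_cons, List.any_nil, Bool.or_false, Bool.or_eq_true, not_or, Bool.not_eq_true] at h0 h1 h2 h3
              have hb : (pvKeywordRanks.foldl (fun a p => if PySem.Str.isIn p.1 t then min a p.2 else a) 7) = 4 := by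
                refine le_antisymm ?_ ?_
                · rcases h4 with h|h|h <;>
                    exact pvFold_le_of_mem t _ _ pvKeywordRanks (by simp [pvKeywordRanks]) h 7
                · refine pvFold_lb t 4 pvKeywordRanks 7 ?_ (by norm_num)
                  intro p hp hc
                  simp only [pvKeywordRanks] at hp
                  fin_cases hp <;> simp_all
              rw [hb]
              simp [pvCategories]
            case neg =>
              simp only [if_neg h4]
              by_cases h5 : (["COOKIE", "GRANOLA", "COFFEE", "REDBRICK", "HONEY", "BEYOND BREAD", "BAKERS OVEN"].any
          (fun x => PySem.Str.isIn x t) || PySem.Str.isIn "B&B" t) = true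
              case pos =>
                simp only [if_pos h5]
                simp only [List.any_cons, List.any_nil, Bool.or_false, Bool.or_eq_true, or_assoc] at h5
                simp only [List.any_cons, List.any_nil, Bool.or_false, Bool.or_eq_true, not_or, Bool.not_eq_true] at h0 h1 h2 h3 h4
                have hb : (pvKeywordRanks.foldl (fun a p => if PySem.Str.isIn p.1 t then min a p.2 else a) 7) = 5 := by
                  refine le_antisymm ?_ ?_
                  · rcases h5 with h|h|h|h|h|h|h|h <;>
                      exact pvFold_le_of_mem t _ _ pvKeywordRanks (by simp [pvKeywordRanks]) h 7
                  · refine pvFold_lb t 5 pvKeywordRanks 7 ?_ (by norm_num)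
                    intro p hp hc
                    simp only [pvKeywordRanks] at hp
                    fin_cases hp <;> simp_all
                rw [hb]
                simp [pvCategories]
              case neg =>
                simp only [if_neg h5]
                by_cases h6 : (["BUN", "ROLL"].any (fun x => PySem.Str.isIn x t)) = true
                case pos =>
                  simp only [if_pos h6]
                  simp only [List.any_cons, List.any_nil, Bool.or_false, Bool.or_eq_true, or_assoc] at h6
                  simp only [List.any_cons, List.any_nil, Bool.or_false, Bool.or_eq_true, not_or, Bool.not_eq_true] at h0 h1 h2 h3 h4 h5
                  have hb : (pvKeywordRanks.foldl (fun a p => if PySem.Str.isIn p.1 t then min a p.2 else a) 7) = 6 := by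
                    refine le_antisymm ?_ ?_
                    · rcases h6 with h|h <;>
                        exact pvFold_le_of_mem t _ _ pvKeywordRanks (by simp [pvKeywordRanks]) h 7
                    · refine pvFold_lb t 6 pvKeywordRanks 7 ?_ (by norm_num)
                      intro p hp hc
                      simp only [pvKeywordRanks] at hp
                      fin_cases hp <;> simp_all
                  rw [hb]
                  simp [pvCategories]
                case neg =>
                  simp only [if_neg h6]
                  simp only [List.any_cons, List.any_nil, Bool.or_false, Bool.or_eq_true, not_or, Bool.not_eq_true] at h0 h1 h2 h3 h4 h5 h6
                  have hb : (pvKeywordRanks.foldl (fun a p => if PySem.Str.isIn p.1 t then min a p.2 else a) 7) = 7 := by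
                    refine le_antisymm (pvFold_le_init t pvKeywordRanks 7) ?_
                    refine pvFold_lb t 7 pvKeywordRanks 7 ?_ (le_refl 7)
                    intro p hp hc
                    simp only [pvKeywordRanks] at hp
                    fin_cases hp <;> simp_all
                  rw [hb]
                  simp
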